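-- pv_equiv track=rewrite | github.com/takayadayo/Robocam-gaussian-splatting | sfm_minimal_colmap.py | build_tracks
-- ===== SOURCE A (Python) =====
-- from collections import defaultdict
--
-- class DSU:
--     def __init__(self, n):
--         self.parent = list(range(n))
--         self.size = [1] * n
--
--     def find(self, x):
--         while self.parent[x] != x:
--             self.parent[x] = self.parent[self.parent[x]]
--             x = self.parent[x]
--         return x
--
--     def union(self, a, b):
--         ra, rb = self.find(a), self.find(b)
--         if ra == rb:
--             return ra
--         if self.size[ra] < self.size[rb]:
--             ra, rb = rb, ra
--         self.parent[rb] = ra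
--         self.size[ra] += self.size[rb]
--         return ra
--
-- def build_tracks(keypoints, match_dict):
--     offsets = []
--     gid = 0
--     for kp in keypoints:
--         offsets.append(gid)
--         gid += len(kp)
--
--     dsu = DSU(gid)
--     for (i, j), pairs in match_dict.items():
--         offset_i = offsets[i]
--         offset_j = offsets[j]
--         for a, b in pairs:
--             dsu.union(offset_i + a, offset_j + b)
--
--     tracks = defaultdict(list)
--     for img_id, kps in enumerate(keypoints):
--         offset = offsets[img_id]
--         for idx in range(len(kps)):
--             root = dsu.find(offset + idx)
--             tracks[root].append((img_id, idx))
--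
--     filtered = [obs for obs in tracks.values() if len(obs) >= 2]
--     return filtered
-- ===== SOURCE B (Python) =====
-- def build_tracks(keypoints, match_dict):
--     offsets = []
--     gid = 0
--     for kp in keypoints:
--         offsets.append(gid)
--         gid += len(kp)
--     nodes = [(img_id, idx) for img_id, kps in enumerate(keypoints) for idx in range(len(kps))]
--     # connected-component labels: label[g] is the smallest global id in g's component
--     label = list(range(gid))
--     for (i, j), pairs in match_dict.items():
--         oi = offsets[i]
--         oj = offsets[j]
--         for a, b in pairs:
--             lu = label[oi + a]
--             lv = label[oj + b]
--             if lu != lv: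
--                 m = lu if lu < lv else lv
--                 label = [m if (l == lu or l == lv) else l for l in label]
--     tracks = []
--     for s in range(gid):
--         if label[s] == s:
--             comp = [nodes[g] for g in range(gid) if label[g] == s]
--             if len(comp) >= 2:
--                 tracks.append(comp)
--     return tracks
-- ===== Notes on version B (the rewrite author's own statement) =====
-- stated objective: alternative
-- what changed: replaces the union-find structure (path-halving find, union by size, defaultdict grouping by root) with a per-edge minimum-label relabelling of a flat label array followed by an ordered scan over self-labelled representatives
import Mathlib
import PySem

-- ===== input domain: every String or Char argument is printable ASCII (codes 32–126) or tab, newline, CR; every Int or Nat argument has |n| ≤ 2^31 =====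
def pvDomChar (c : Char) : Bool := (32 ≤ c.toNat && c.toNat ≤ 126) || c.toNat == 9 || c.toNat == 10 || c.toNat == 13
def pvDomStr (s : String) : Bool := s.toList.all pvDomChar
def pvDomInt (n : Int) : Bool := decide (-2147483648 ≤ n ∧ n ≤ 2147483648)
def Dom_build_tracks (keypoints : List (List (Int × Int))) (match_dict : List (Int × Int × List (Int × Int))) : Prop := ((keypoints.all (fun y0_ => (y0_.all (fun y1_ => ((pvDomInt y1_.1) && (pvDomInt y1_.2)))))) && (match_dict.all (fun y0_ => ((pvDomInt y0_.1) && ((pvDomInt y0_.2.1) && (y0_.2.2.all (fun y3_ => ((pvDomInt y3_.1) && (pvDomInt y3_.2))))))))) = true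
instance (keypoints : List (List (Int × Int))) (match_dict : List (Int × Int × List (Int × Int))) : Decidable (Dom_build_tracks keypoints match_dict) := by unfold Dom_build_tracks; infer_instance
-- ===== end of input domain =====

-- B replaces A's union-find (path-halving, union by size) by per-edge minimum-label relabelling of
-- a label array plus an ordered representative scan: a different algorithm, not claimed faster.

-- ===== PORT A =====
-- DSU.find: the Python while-loop halts within parent-list-length iterations on every state the
-- program reaches (proved below, pvExists_fix/dsuFind_spec); list indexing uses pyGetD/pySetD,
-- exact under Pre_'s in-range indices (elsewhere Python raises IndexError; Pre_ excludes it).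
def dsuFind : Nat → List Int → Int → List Int × Int
  | 0, parent, x => (parent, x)
  | fuel+1, parent, x =>
    let px := PySem.List.pyGetD parent x x
    if px = x then (parent, x)
    else
      let ppx := PySem.List.pyGetD parent px px
      dsuFind fuel (PySem.List.pySetD parent x ppx) ppx


def dsuUnion (parent size : List Int) (a b : Int) : List Int × List Int :=
  let r1 := dsuFind parent.length parent a
  let r2 := dsuFind r1.1.length r1.1 b
  let p2 := r2.1
  if r1.2 = r2.2 then (p2, size)
  else
    let rab := if PySem.List.pyGetD size r1.2 0 < PySem.List.pyGetD size r2.2 0 then (r2.2, r1.2) else (r1.2, r2.2)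
    (PySem.List.pySetD p2 rab.2 rab.1,
     PySem.List.pySetD size rab.1 (PySem.List.pyGetD size rab.1 0 + PySem.List.pyGetD size rab.2 0))


def build_tracks (keypoints : List (List (Int × Int))) (match_dict : List (Int × Int × List (Int × Int))) : List (List (Int × Int)) :=
  let og := keypoints.foldl (fun (acc : List Int × Int) kp => (acc.1 ++ [acc.2], acc.2 + kp.length)) ([], 0)
  let offsets := og.1
  let gid := og.2
  let ps := match_dict.foldl (fun (st : List Int × List Int) e =>
      let oi := PySem.List.pyGetD offsets e.1 0
      let oj := PySem.List.pyGetD offsets e.2.1 0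
      e.2.2.foldl (fun st ab => dsuUnion st.1 st.2 (oi + ab.1) (oj + ab.2)) st)
    (PySem.List.pyRange 0 gid 1, PySem.List.pyRepeat [1] gid)
  let tp := (PySem.List.enumerate keypoints 0).foldl
    (fun (st : PySem.Dict Int (List (Int × Int)) × List Int) ik =>
      let offset := PySem.List.pyGetD offsets ik.1 0
      (PySem.List.pyRange 0 ik.2.length 1).foldl
        (fun st idx =>
          let fr := dsuFind st.2.length st.2 (offset + idx)
          (st.1.modify fr.2 [] (fun l => l ++ [(ik.1, idx)]), fr.1))
        st)
    (PySem.Dict.empty, ps.1)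
  (tp.1.values).filter (fun obs => decide (2 ≤ obs.length))


-- ===== PORT B =====
def build_tracks_alt (keypoints : List (List (Int × Int))) (match_dict : List (Int × Int × List (Int × Int))) : List (List (Int × Int)) :=
  let og := keypoints.foldl (fun (acc : List Int × Int) kp => (acc.1 ++ [acc.2], acc.2 + kp.length)) ([], 0)
  let offsets := og.1
  let gid := og.2
  let nodes := (PySem.List.enumerate keypoints 0).foldl
    (fun (acc : List (Int × Int)) ik => acc ++ (PySem.List.pyRange 0 ik.2.length 1).map (fun idx => (ik.1, idx))) []
  let label := match_dict.foldl (fun (lab : List Int) e =>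
      let oi := PySem.List.pyGetD offsets e.1 0
      let oj := PySem.List.pyGetD offsets e.2.1 0
      e.2.2.foldl (fun lab ab =>
        let lu := PySem.List.pyGetD lab (oi + ab.1) 0
        let lv := PySem.List.pyGetD lab (oj + ab.2) 0
        if lu ≠ lv then
          let m := if lu < lv then lu else lv
          lab.map (fun l => if l = lu ∨ l = lv then m else l)
        else lab) lab)
    (PySem.List.pyRange 0 gid 1)
  (PySem.List.pyRange 0 gid 1).foldl (fun tracks s =>
    if PySem.List.pyGetD label s 0 = s then
      let comp := ((PySem.List.pyRange 0 gid 1).filter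
          (fun g => decide (PySem.List.pyGetD label g 0 = s))).map
          (fun g => PySem.List.pyGetD nodes g ((0 : Int), (0 : Int)))
      if 2 ≤ comp.length then tracks ++ [comp] else tracks
    else tracks) []


-- ===== PRECONDITION & SPEC =====
-- shape helpers used by Pre_: flat-array offsets of the keypoint lists and Python's negative-index rule
def pvOff (kps : List (List (Int × Int))) (k : Nat) : Nat := ((kps.take k).map List.length).sum
def pvN (kps : List (List (Int × Int))) : Nat := (kps.map List.length).sum
def pvWrapIdx (L : Nat) (i : Int) : Nat := (if i < 0 then i + L else i).toNat

-- Pre_ excludes exactly (a) association lists with a repeated (i, j) key, which a genuine Python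
-- dict argument cannot carry, and (b) match entries whose image index or flat keypoint index is
-- out of Python's (negative-index included) range, where A raises IndexError.
def Pre_build_tracks (keypoints : List (List (Int × Int))) (match_dict : List (Int × Int × List (Int × Int))) : Prop :=
  (match_dict.map (fun e => (e.1, e.2.1))).Nodup ∧
  ∀ e ∈ match_dict,
    -(keypoints.length : Int) ≤ e.1 ∧ e.1 < keypoints.length ∧
    -(keypoints.length : Int) ≤ e.2.1 ∧ e.2.1 < keypoints.length ∧
    ∀ ab ∈ e.2.2,
      -((pvN keypoints : Nat) : Int) ≤ (pvOff keypoints (pvWrapIdx keypoints.length e.1) : Int) + ab.1 ∧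
      (pvOff keypoints (pvWrapIdx keypoints.length e.1) : Int) + ab.1 < ((pvN keypoints : Nat) : Int) ∧
      -((pvN keypoints : Nat) : Int) ≤ (pvOff keypoints (pvWrapIdx keypoints.length e.2.1) : Int) + ab.2 ∧
      (pvOff keypoints (pvWrapIdx keypoints.length e.2.1) : Int) + ab.2 < ((pvN keypoints : Nat) : Int)

instance (keypoints : List (List (Int × Int))) (match_dict : List (Int × Int × List (Int × Int))) : Decidable (Pre_build_tracks keypoints match_dict) := by
  unfold Pre_build_tracks; infer_instance

def pvWitness_build_tracks : (List (List (Int × Int))) × (List (Int × Int × List (Int × Int))) :=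
  ([[(0, 0)], [(1, 1)]], [(0, 1, [(0, 0)])])

def Spec_build_tracks (keypoints : List (List (Int × Int))) (match_dict : List (Int × Int × List (Int × Int))) (out : List (List (Int × Int))) : Prop := out = build_tracks_alt keypoints match_dict
instance (keypoints : List (List (Int × Int))) (match_dict : List (Int × Int × List (Int × Int))) (out : List (List (Int × Int))) : Decidable (Spec_build_tracks keypoints match_dict out) := by unfold Spec_build_tracks; infer_instance

-- ===== CLAIM (what is proved, stated in full; the proofs are below) =====
def Claim_equal_build_tracks : Prop := ∀ (keypoints : List (List (Int × Int))) (match_dict : List (Int × Int × List (Int × Int))), Dom_build_tracks keypoints match_dict → Pre_build_tracks keypoints match_dict → Spec_build_tracks keypoints match_dict (build_tracks keypoints match_dict)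

-- ===== LEMMAS AND PROOFS =====

def pvF (p : List Int) (x : Int) : Int := PySem.List.pyGetD p x x
def pvRoot (p : List Int) (x : Int) : Int := (pvF p)^[p.length] x
def pvInR (n : Nat) (x : Int) : Prop := 0 ≤ x ∧ x < (n : Int)
def pvGood (p : List Int) (d : Int → Nat) : Prop :=
  ∀ x : Int, pvInR p.length x → pvInR p.length (pvF p x) ∧ (pvF p x ≠ x → d x < d (pvF p x))
def pvReach (p : List Int) (x y : Int) : Prop := ∃ k : Nat, (pvF p)^[k] x = y

lemma pvF_set_self (p : List Int) (x v : Int) (hx : pvInR p.length x) :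
    pvF (PySem.List.pySetD p x v) x = v := by
  obtain ⟨h0, h1⟩ := hx
  rw [pvF, PySem.List.pySetD_of_nonneg p v h0,
    PySem.List.pyGetD_eq_getElem _ _ h0 (by simpa using h1)]
  rw [List.getElem_set_self]

lemma pvF_set_ne (p : List Int) (x v y : Int) (hx : pvInR p.length x) (hy : pvInR p.length y)
    (hne : y ≠ x) : pvF (PySem.List.pySetD p x v) y = pvF p y := by
  obtain ⟨h0, h1⟩ := hx; obtain ⟨g0, g1⟩ := hy
  rw [pvF, pvF, PySem.List.pySetD_of_nonneg p v h0]
  rw [PySem.List.pyGetD_eq_getElem _ _ g0 (by simpa using g1),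
      PySem.List.pyGetD_eq_getElem _ _ g0 g1]
  rw [List.getElem_set_ne (by omega)]

-- chain stays in range
lemma pvIter_inR {p : List Int} {d : Int → Nat} (hg : pvGood p d) {x : Int}
    (hx : pvInR p.length x) (k : Nat) : pvInR p.length ((pvF p)^[k] x) := by
  induction k with
  | zero => simpa
  | succ k ih => rw [Function.iterate_succ_apply']; exact (hg _ ih).1

lemma pvFix_iterate {p : List Int} {z : Int} (hz : pvF p z = z) (k : Nat) :
    (pvF p)^[k] z = z := Function.iterate_fixed hz k

-- d is monotone along the chain
lemma pvIter_d_mono {p : List Int} {d : Int → Nat} (hg : pvGood p d) {x : Int}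
    (hx : pvInR p.length x) (k : Nat) : d x ≤ d ((pvF p)^[k] x) := by
  induction k with
  | zero => simp
  | succ k ih =>
    rw [Function.iterate_succ_apply']
    set z := (pvF p)^[k] x with hz
    have hzr := pvIter_inR hg hx k
    by_cases hfz : pvF p z = z
    · rw [hfz]; exact ih
    · exact le_of_lt (lt_of_le_of_lt ih ((hg z hzr).2 hfz))

-- a reachable fixpoint is unique
lemma pvReach_fix_unique {p : List Int} {x z1 z2 : Int} (h1 : pvF p z1 = z1)
    (r1 : pvReach p x z1) (h2 : pvF p z2 = z2) (r2 : pvReach p x z2) : z1 = z2 := by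
  obtain ⟨a, ha⟩ := r1; obtain ⟨b, hb⟩ := r2
  have key : ∀ (c e : Nat) (w1 w2 : Int), (pvF p)^[c] x = w1 → (pvF p)^[e] x = w2 →
      pvF p w1 = w1 → c ≤ e → w1 = w2 := by
    intro c e w1 w2 hc he hw hce
    have h2' : (pvF p)^[e - c + c] x = w2 := by rw [Nat.sub_add_cancel hce]; exact he
    rw [Function.iterate_add_apply, hc, pvFix_iterate hw] at h2'
    exact h2'
  rcases le_total a b with h | h
  · exact key a b z1 z2 ha hb h1 h
  · exact (key b a z2 z1 hb ha h2 h).symm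

-- pigeonhole: some iterate within n steps is a fixpoint
lemma pvExists_fix {p : List Int} {d : Int → Nat} (hg : pvGood p d) {x : Int}
    (hx : pvInR p.length x) : ∃ k ≤ p.length, pvF p ((pvF p)^[k] x) = (pvF p)^[k] x := by
  by_contra hcon
  push_neg at hcon
  set n := p.length with hn
  have step : ∀ k, k ≤ n → d ((pvF p)^[k] x) < d ((pvF p)^[k+1] x) := by
    intro k hk
    have hr := pvIter_inR hg hx k
    have hne := hcon k hk
    rw [Function.iterate_succ_apply']
    exact (hg _ hr).2 hne
  have mono : ∀ m a, a + m + 1 ≤ n + 1 → d ((pvF p)^[a] x) < d ((pvF p)^[a+m+1] x) := by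
    intro m
    induction m with
    | zero => intro a h; exact step a (by omega)
    | succ m ih =>
      intro a h
      exact lt_trans (ih a (by omega)) (by
        have := step (a+m+1) (by omega)
        simpa [Nat.add_assoc] using this)
  have inj : Set.InjOn (fun k => ((pvF p)^[k] x).toNat) (Finset.range (n+1)) := by
    intro a ha b hb hab
    simp only [Finset.coe_range, Set.mem_Iio] at ha hb
    by_contra hne
    rcases Nat.lt_or_ge a b with h | h
    · have h1 := mono (b - a - 1) a (by omega)
      have : a + (b - a - 1) + 1 = b := by omega
      rw [this] at h1
      have e1 := pvIter_inR hg hx a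
      have e2 := pvIter_inR hg hx b
      have heq : (pvF p)^[a] x = (pvF p)^[b] x := by
        have t1 := Int.toNat_of_nonneg e1.1
        have t2 := Int.toNat_of_nonneg e2.1
        simp only at hab
        omega
      rw [heq] at h1
      exact absurd h1 (lt_irrefl _)
    · rcases Nat.lt_or_ge b a with h2 | h2
      · have h1 := mono (a - b - 1) b (by omega)
        have : b + (a - b - 1) + 1 = a := by omega
        rw [this] at h1
        have e1 := pvIter_inR hg hx a
        have e2 := pvIter_inR hg hx b
        have heq : (pvF p)^[a] x = (pvF p)^[b] x := by
          have t1 := Int.toNat_of_nonneg e1.1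
          have t2 := Int.toNat_of_nonneg e2.1
          simp only at hab
          omega
        rw [heq] at h1
        exact absurd h1 (lt_irrefl _)
      · omega
  have hsub : ∀ k ∈ Finset.range (n+1), ((pvF p)^[k] x).toNat ∈ Finset.range n := by
    intro k hk
    obtain ⟨u1, u2⟩ := pvIter_inR hg hx k
    simp only [Finset.mem_range]
    omega
  have := Finset.card_le_card_of_injOn _ hsub inj
  simp at this

lemma pvRoot_spec {p : List Int} {d : Int → Nat} (hg : pvGood p d) {x : Int}
    (hx : pvInR p.length x) :
    pvF p (pvRoot p x) = pvRoot p x ∧ pvInR p.length (pvRoot p x) := by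
  obtain ⟨k, hk, hfix⟩ := pvExists_fix hg hx
  have he : pvRoot p x = (pvF p)^[k] x := by
    rw [pvRoot]
    have h2 : p.length = (p.length - k) + k := by omega
    rw [h2, Function.iterate_add_apply, pvFix_iterate hfix]
  rw [he]
  exact ⟨hfix, pvIter_inR hg hx k⟩

lemma pvRoot_reach (p : List Int) (x : Int) : pvReach p x (pvRoot p x) := ⟨p.length, rfl⟩

lemma pvRoot_eq_of_reach_fix {p : List Int} {d : Int → Nat} (hg : pvGood p d) {x z : Int}
    (hx : pvInR p.length x) (hz : pvF p z = z) (hr : pvReach p x z) : pvRoot p x = z :=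
  pvReach_fix_unique (pvRoot_spec hg hx).1 (pvRoot_reach p x) hz hr

lemma pvRoot_fix {p : List Int} {z : Int} (hz : pvF p z = z) : pvRoot p z = z :=
  pvFix_iterate hz _

lemma pvReach_step {p : List Int} {a b z : Int} (h : pvF p a = b) (hr : pvReach p b z) :
    pvReach p a z := by
  obtain ⟨k, hk⟩ := hr
  exact ⟨k + 1, by rw [Function.iterate_succ_apply, h, hk]⟩

lemma pvRoot_fF {p : List Int} {d : Int → Nat} (hg : pvGood p d) {x : Int}
    (hx : pvInR p.length x) : pvRoot p (pvF p x) = pvRoot p x := by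
  have hfx := (hg x hx).1
  refine pvRoot_eq_of_reach_fix hg hfx (pvRoot_spec hg hx).1 ?_
  obtain ⟨k, hk⟩ := pvRoot_reach p x
  rcases k with _ | k
  · -- zero steps: x is its own root, hence fixed?  root p x = x means x reachable fix
    simp only [Function.iterate_zero, id_eq] at hk
    have hfx2 : pvF p x = x := by
      have h1 := (pvRoot_spec hg hx).1
      rw [← hk] at h1; exact h1
    exact ⟨0, by simp only [Function.iterate_zero, id_eq]; rw [hfx2]; exact hk⟩
  · exact ⟨k, by rw [← Function.iterate_succ_apply, hk]⟩

-- path-halving step preserves the forest certificate and every root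
lemma pvHalve {p : List Int} {d : Int → Nat} (hg : pvGood p d) {x : Int}
    (hx : pvInR p.length x) (hnf : pvF p x ≠ x) :
    (PySem.List.pySetD p x (pvF p (pvF p x))).length = p.length ∧
    pvGood (PySem.List.pySetD p x (pvF p (pvF p x))) d ∧
    (∀ y, pvInR p.length y → pvRoot (PySem.List.pySetD p x (pvF p (pvF p x))) y = pvRoot p y) := by
  set px := pvF p x with hpx
  set ppx := pvF p px with hppx
  set p1 := PySem.List.pySetD p x ppx with hp1
  have hlen : p1.length = p.length := PySem.List.length_pySetD p x ppx
  have hpxr : pvInR p.length px := (hg x hx).1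
  have hppxr : pvInR p.length ppx := (hg px hpxr).1
  have hF1x : pvF p1 x = ppx := pvF_set_self p x ppx hx
  have hF1 : ∀ y, pvInR p.length y → y ≠ x → pvF p1 y = pvF p y := fun y hy hne =>
    pvF_set_ne p x ppx y hx hy hne
  have hgood1 : pvGood p1 d := by
    intro y hy
    rw [hlen] at hy ⊢
    by_cases hyx : y = x
    · subst hyx
      rw [hF1x]
      refine ⟨hppxr, fun hne => ?_⟩
      have h1 : d y < d px := (hg y hx).2 hnf
      by_cases h2 : pvF p px = px
      · rw [hppx, h2]; exact h1
      · exact lt_trans h1 ((hg px hpxr).2 h2)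
    · rw [hF1 y hy hyx]
      exact hg y hy
  refine ⟨hlen, hgood1, fun y hy => ?_⟩
  -- reach transport
  have RA : ∀ k, ∀ y, pvInR p.length y → pvF p ((pvF p)^[k] y) = (pvF p)^[k] y →
      pvReach p1 y ((pvF p)^[k] y) := by
    intro k
    induction k using Nat.strong_induction_on with
    | _ k ih =>
      intro y hy hfixk
      by_cases hyf : pvF p y = y
      · rw [pvFix_iterate hyf k]
        exact ⟨0, rfl⟩
      · have hk0 : k ≠ 0 := by
          intro h; subst h; simp only [Function.iterate_zero, id_eq] at hfixk; exact hyf hfixk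
        by_cases hyx : y = x
        · subst hyx
          by_cases hpxf : pvF p px = px
          · -- chain after one step is constant at px
            have hz : (pvF p)^[k] y = px := by
              have h1 : (pvF p)^[k] y = (pvF p)^[k-1] (pvF p y) := by
                conv_lhs => rw [show k = (k-1) + 1 by omega]
                rw [Function.iterate_succ_apply]
              rw [h1, ← hpx, pvFix_iterate hpxf]
            rw [hz]
            have : ppx = px := by rw [hppx, hpxf]
            exact ⟨1, by simp only [Function.iterate_one]; rw [hF1x, this]⟩
          · have hk1 : k ≠ 1 := by
              intro h; subst h
              simp only [Function.iterate_one] at hfixk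
              exact hpxf hfixk
            have hz : (pvF p)^[k] y = (pvF p)^[k-2] ppx := by
              conv_lhs => rw [show k = (k-2) + 1 + 1 by omega]
              rw [Function.iterate_succ_apply, Function.iterate_succ_apply, ← hpx, ← hppx]
            rw [hz]
            have hr := ih (k-2) (by omega) ppx hppxr (by rw [← hz]; rw [hz] at hfixk; rw [hz]; exact hfixk)
            exact pvReach_step hF1x hr
        · have hz : (pvF p)^[k] y = (pvF p)^[k-1] (pvF p y) := by
            conv_lhs => rw [show k = (k-1) + 1 by omega]
            rw [Function.iterate_succ_apply]
          rw [hz]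
          have hr := ih (k-1) (by omega) (pvF p y) (hg y hy).1 (by rw [← hz]; rw [hz] at hfixk; rw [hz]; exact hfixk)
          exact pvReach_step (hF1 y hy hyx) hr
  -- now equate roots
  obtain ⟨k, hk, hfix⟩ := pvExists_fix hg hy
  have hkroot : (pvF p)^[k] y = pvRoot p y :=
    (pvRoot_eq_of_reach_fix hg hy hfix ⟨k, rfl⟩).symm
  have hreach : pvReach p1 y (pvRoot p y) := by rw [← hkroot]; exact RA k y hy hfix
  have hrfix : pvF p1 (pvRoot p y) = pvRoot p y := by
    have hrx : pvRoot p y ≠ x := by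
      intro h
      have := (pvRoot_spec hg hy).1
      rw [h] at this
      exact hnf this
    rw [hF1 _ (pvRoot_spec hg hy).2 hrx]
    exact (pvRoot_spec hg hy).1
  exact pvRoot_eq_of_reach_fix hgood1 (by rw [hlen]; exact hy) hrfix hreach

-- linking root rb under root ra preserves a forest certificate; roots merge
lemma pvLink {p : List Int} {d : Int → Nat} (hg : pvGood p d) {ra rb : Int}
    (hra : pvInR p.length ra) (hrb : pvInR p.length rb)
    (fra : pvF p ra = ra) (frb : pvF p rb = rb) (hne : ra ≠ rb) :
    (PySem.List.pySetD p rb ra).length = p.length ∧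
    pvGood (PySem.List.pySetD p rb ra) (fun y => if y = ra then max (d ra) (d rb + 1) else d y) ∧
    (∀ y, pvInR p.length y →
      pvRoot (PySem.List.pySetD p rb ra) y = if pvRoot p y = rb then ra else pvRoot p y) := by
  set p3 := PySem.List.pySetD p rb ra with hp3
  set d' : Int → Nat := fun y => if y = ra then max (d ra) (d rb + 1) else d y with hd'
  have hlen : p3.length = p.length := PySem.List.length_pySetD p rb ra
  have hF3b : pvF p3 rb = ra := pvF_set_self p rb ra hrb
  have hF3 : ∀ y, pvInR p.length y → y ≠ rb → pvF p3 y = pvF p y := fun y hy h =>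
    pvF_set_ne p rb ra y hrb hy h
  have hgood : pvGood p3 d' := by
    intro y hy
    rw [hlen] at hy ⊢
    by_cases hyb : y = rb
    · subst hyb
      rw [hF3b]
      refine ⟨hra, fun _ => ?_⟩
      have e1 : d' y = d y := by simp [hd', Ne.symm hne]
      have e2 : d' ra = max (d ra) (d y + 1) := by simp [hd']
      rw [e1, e2]
      exact lt_of_lt_of_le (Nat.lt_succ_self _) (le_max_right _ _)
    · rw [hF3 y hy hyb]
      obtain ⟨hin, hlt⟩ := hg y hy
      refine ⟨hin, fun hne2 => ?_⟩
      by_cases hya : y = ra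
      · rw [hya] at hne2
        exact absurd fra hne2
      · have e1 : d' y = d y := by simp [hd', hya]
        by_cases hfa : pvF p y = ra
        · have e2 : d' (pvF p y) = max (d ra) (d rb + 1) := by simp [hd', hfa]
          rw [e1, e2]
          have h3 := hlt hne2
          rw [hfa] at h3
          omega
        · have e2 : d' (pvF p y) = d (pvF p y) := by simp [hd', hfa]
          rw [e1, e2]
          exact hlt hne2
  refine ⟨hlen, hgood, fun y hy => ?_⟩
  have RB : ∀ k, ∀ y, pvInR p.length y → pvF p ((pvF p)^[k] y) = (pvF p)^[k] y →
      pvReach p3 y (if (pvF p)^[k] y = rb then ra else (pvF p)^[k] y) := by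
    intro k
    induction k using Nat.strong_induction_on with
    | _ k ih =>
      intro y hy hfixk
      by_cases hyf : pvF p y = y
      · rw [pvFix_iterate hyf k]
        by_cases hyb : y = rb
        · subst hyb
          rw [if_pos rfl]
          exact ⟨1, by simp only [Function.iterate_one]; exact hF3b⟩
        · simp only [if_neg hyb]
          exact ⟨0, rfl⟩
      · have hk0 : k ≠ 0 := fun h => by
          subst h; simp only [Function.iterate_zero, id_eq] at hfixk; exact hyf hfixk
        have hyb : y ≠ rb := fun h => hyf (by rw [h]; exact frb)
        have hz : (pvF p)^[k] y = (pvF p)^[k-1] (pvF p y) := by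
          conv_lhs => rw [show k = (k-1) + 1 by omega]
          rw [Function.iterate_succ_apply]
        rw [hz]
        have hr := ih (k-1) (by omega) (pvF p y) (hg y hy).1 (by rw [← hz]; exact hfixk)
        exact pvReach_step (hF3 y hy hyb) hr
  obtain ⟨k, hk, hfix⟩ := pvExists_fix hg hy
  have hkroot : (pvF p)^[k] y = pvRoot p y :=
    (pvRoot_eq_of_reach_fix hg hy hfix ⟨k, rfl⟩).symm
  have hreach := RB k y hy hfix
  rw [hkroot] at hreach
  have hfix3 : pvF p3 (if pvRoot p y = rb then ra else pvRoot p y) =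
      (if pvRoot p y = rb then ra else pvRoot p y) := by
    by_cases h : pvRoot p y = rb
    · simp only [if_pos h]
      rw [hF3 ra hra hne]
      exact fra
    · simp only [if_neg h]
      rw [hF3 _ (pvRoot_spec hg hy).2 h]
      exact (pvRoot_spec hg hy).1
  exact pvRoot_eq_of_reach_fix hgood (by rw [hlen]; exact hy) hfix3 hreach

lemma dsuFind_spec {d : Int → Nat} : ∀ (k : Nat) (p : List Int) (x : Int) (fuel : Nat),
    pvGood p d → pvInR p.length x → pvF p ((pvF p)^[k] x) = (pvF p)^[k] x → k ≤ fuel →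
    (dsuFind fuel p x).2 = pvRoot p x ∧ (dsuFind fuel p x).1.length = p.length ∧
    pvGood (dsuFind fuel p x).1 d ∧
    (∀ y, pvInR p.length y → pvRoot (dsuFind fuel p x).1 y = pvRoot p y) := by
  intro k
  induction k using Nat.strong_induction_on with
  | _ k ih =>
    intro p x fuel hg hx hfixk hkf
    cases fuel with
    | zero =>
      have hk0 : k = 0 := by omega
      subst hk0
      simp only [Function.iterate_zero, id_eq] at hfixk
      have hstep0 : dsuFind 0 p x = (p, x) := rfl
      rw [hstep0]
      exact ⟨(pvRoot_fix hfixk).symm, rfl, hg, fun y hy => rfl⟩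
    | succ fuel =>
      by_cases hpx : PySem.List.pyGetD p x x = x
      · have hstep0 : dsuFind (fuel+1) p x = (p, x) := by
          simp only [dsuFind, if_pos hpx]
        rw [hstep0]
        exact ⟨(pvRoot_fix hpx).symm, rfl, hg, fun y hy => rfl⟩
      · have hstep : dsuFind (fuel+1) p x =
            dsuFind fuel (PySem.List.pySetD p x (pvF p (pvF p x))) (pvF p (pvF p x)) := by
          simp only [dsuFind, if_neg hpx]
          rfl
        have hfx : pvF p x ≠ x := hpx
        have hk0 : k ≠ 0 := fun h => by
          subst h; simp only [Function.iterate_zero, id_eq] at hfixk; exact hfx hfixk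
        obtain ⟨hlen1, hgood1, hroots1⟩ := pvHalve hg hx hfx
        set px := pvF p x with hpxd
        set ppx := pvF p px with hppxd
        set p1 := PySem.List.pySetD p x ppx with hp1
        have hpxr : pvInR p.length px := (hg x hx).1
        have hppxr : pvInR p.length ppx := (hg px hpxr).1
        -- find a fuel-bounded fixpoint witness for the recursive call
        have hrec : ∃ k', k' < k ∧ k' ≤ fuel ∧
            pvF p1 ((pvF p1)^[k'] ppx) = (pvF p1)^[k'] ppx := by
          by_cases hpxf : pvF p px = px
          · refine ⟨0, by omega, by omega, ?_⟩
            simp only [Function.iterate_zero, id_eq]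
            have hne : ppx ≠ x := by
              rw [hppxd, hpxf]
              exact fun h => hfx (by rw [hpxd] at h ⊢; rw [h])
            rw [pvF_set_ne p x ppx ppx hx hppxr hne, hppxd, hpxf]
            exact hpxf
          · have hk1 : k ≠ 1 := fun h => by
              subst h
              simp only [Function.iterate_one] at hfixk
              exact hpxf hfixk
            have havoid : ∀ j : Nat, (pvF p)^[j] ppx ≠ x := by
              intro j heq
              have h1 : d x < d px := (hg x hx).2 hfx
              have h2 : d px < d ppx := (hg px hpxr).2 hpxf
              have h3 : d ppx ≤ d ((pvF p)^[j] ppx) := pvIter_d_mono hg hppxr j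
              rw [heq] at h3
              omega
            have htrans : ∀ j : Nat, (pvF p1)^[j] ppx = (pvF p)^[j] ppx := by
              intro j
              induction j with
              | zero => rfl
              | succ j ihj =>
                rw [Function.iterate_succ_apply', Function.iterate_succ_apply', ihj]
                exact pvF_set_ne p x ppx _ hx (pvIter_inR hg hppxr j) (havoid j)
            have hshift : (pvF p)^[k-2] ppx = (pvF p)^[k] x := by
              conv_rhs => rw [show k = (k-2) + 1 + 1 by omega]
              rw [Function.iterate_succ_apply, Function.iterate_succ_apply, ← hpxd, ← hppxd]
            refine ⟨k - 2, by omega, by omega, ?_⟩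
            rw [htrans (k-2)]
            rw [pvF_set_ne p x ppx _ hx (pvIter_inR hg hppxr (k-2)) (havoid (k-2)), hshift]
            exact hfixk
        obtain ⟨k', hk'1, hk'2, hk'3⟩ := hrec
        have hx1 : pvInR p1.length ppx := by rw [hlen1]; exact hppxr
        obtain ⟨r2, rlen, rgood, rroots⟩ := ih k' hk'1 p1 ppx fuel hgood1 hx1 hk'3 hk'2
        rw [hstep]
        refine ⟨?_, by rw [rlen, hlen1], rgood, fun y hy => ?_⟩
        · rw [r2]
          have e1 : pvRoot p1 ppx = pvRoot p ppx := hroots1 ppx hppxr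
          rw [e1, hppxd, pvRoot_fF hg hpxr, hpxd, pvRoot_fF hg hx]
        · have e2 : pvRoot (dsuFind fuel p1 ppx).1 y = pvRoot p1 y := by
            apply rroots
            rw [hlen1]
            exact hy
          rw [e2]
          exact hroots1 y hy

lemma dsuFind_run {p : List Int} {d : Int → Nat} {x : Int} {fuel : Nat}
    (hg : pvGood p d) (hx : pvInR p.length x) (hfuel : p.length ≤ fuel) :
    (dsuFind fuel p x).2 = pvRoot p x ∧ (dsuFind fuel p x).1.length = p.length ∧
    pvGood (dsuFind fuel p x).1 d ∧
    (∀ y, pvInR p.length y → pvRoot (dsuFind fuel p x).1 y = pvRoot p y) := by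
  obtain ⟨k, hk, hfix⟩ := pvExists_fix hg hx
  exact dsuFind_spec k p x fuel hg hx hfix (le_trans hk hfuel)

lemma pvMerge_iff {rx ry ra rb kept dropped : Int} (hne : ra ≠ rb)
    (hkd : (kept = ra ∧ dropped = rb) ∨ (kept = rb ∧ dropped = ra)) :
    ((if rx = dropped then kept else rx) = (if ry = dropped then kept else ry)) ↔
      (rx = ry ∨ ((rx = ra ∨ rx = rb) ∧ (ry = ra ∨ ry = rb))) := by
  rcases hkd with ⟨hk, hd⟩ | ⟨hk, hd⟩ <;> subst hk <;> subst hd <;> split_ifs <;> omega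

lemma pvRoot_self_fix {p : List Int} {d : Int → Nat} (hg : pvGood p d) {x : Int}
    (hx : pvInR p.length x) (h : pvRoot p x = x) : pvF p x = x := by
  have := (pvRoot_spec hg hx).1
  rwa [h] at this

lemma dsuUnion_spec {n : Nat} {p : List Int} (size : List Int) {a b : Int} {d : Int → Nat}
    (hg : pvGood p d) (hlp : p.length = n) (ha : pvInR n a) (hb : pvInR n b) :
    ∃ d', (dsuUnion p size a b).1.length = n ∧ pvGood (dsuUnion p size a b).1 d' ∧
    ∀ x y, pvInR n x → pvInR n y →
      (pvRoot (dsuUnion p size a b).1 x = pvRoot (dsuUnion p size a b).1 y ↔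
        (pvRoot p x = pvRoot p y ∨
          ((pvRoot p x = pvRoot p a ∨ pvRoot p x = pvRoot p b) ∧
           (pvRoot p y = pvRoot p a ∨ pvRoot p y = pvRoot p b)))) := by
  subst hlp
  obtain ⟨f1r, f1len, f1good, f1roots⟩ := dsuFind_run hg ha (le_refl _)
  set p1 := (dsuFind p.length p a).1 with hp1
  have hb1 : pvInR p1.length b := by rw [f1len]; exact hb
  obtain ⟨f2r, f2len, f2good, f2roots⟩ := dsuFind_run f1good hb1 (le_refl _)
  set p2 := (dsuFind p1.length p1 b).1 with hp2
  have hra : (dsuFind p.length p a).2 = pvRoot p a := f1r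
  have hrb : (dsuFind p1.length p1 b).2 = pvRoot p b := by
    rw [f2r]
    exact f1roots b (by rw [← f1len]; exact hb1)
  have hlen2 : p2.length = p.length := by rw [f2len, f1len]
  have hroots2 : ∀ y, pvInR p.length y → pvRoot p2 y = pvRoot p y := by
    intro y hy
    rw [f2roots y (by rw [f1len]; exact hy)]
    exact f1roots y hy
  by_cases heq : (dsuFind p.length p a).2 = (dsuFind p1.length p1 b).2
  · -- same root: state p2, size unchanged
    have hstep : dsuUnion p size a b = (p2, size) := by
      simp only [dsuUnion]
      rw [← hp1, ← hp2, if_pos heq]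
    rw [hstep]
    refine ⟨d, hlen2, f2good, fun x y hx hy => ?_⟩
    rw [hroots2 x hx, hroots2 y hy]
    rw [hra, hrb] at heq
    constructor
    · intro h; exact Or.inl h
    · rintro (h | ⟨hx1 | hx1, hy1 | hy1⟩) <;> omega
  · set sza := PySem.List.pyGetD size (dsuFind p.length p a).2 0 with hsza
    set szb := PySem.List.pyGetD size (dsuFind p1.length p1 b).2 0 with hszb
    set kd := if sza < szb then ((dsuFind p1.length p1 b).2, (dsuFind p.length p a).2)
              else ((dsuFind p.length p a).2, (dsuFind p1.length p1 b).2) with hkd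
    have hstep : (dsuUnion p size a b).1 = PySem.List.pySetD p2 kd.2 kd.1 := by
      simp only [dsuUnion]
      rw [← hp1, ← hp2, if_neg heq, ← hsza, ← hszb, ← hkd]
    have hkdcases : (kd.1 = pvRoot p a ∧ kd.2 = pvRoot p b) ∨
        (kd.1 = pvRoot p b ∧ kd.2 = pvRoot p a) := by
      rw [hkd]
      split_ifs
      · right; exact ⟨hrb, hra⟩
      · left; exact ⟨hra, hrb⟩
    have hrne : pvRoot p a ≠ pvRoot p b := by
      rw [hra, hrb] at heq; exact heq
    have hfa : pvF p2 (pvRoot p a) = pvRoot p a := by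
      apply pvRoot_self_fix f2good
      · rw [hlen2]; exact (pvRoot_spec hg ha).2
      · rw [hroots2 _ (pvRoot_spec hg ha).2]
        exact pvRoot_fix (pvRoot_spec hg ha).1
    have hfb : pvF p2 (pvRoot p b) = pvRoot p b := by
      apply pvRoot_self_fix f2good
      · rw [hlen2]; exact (pvRoot_spec hg hb).2
      · rw [hroots2 _ (pvRoot_spec hg hb).2]
        exact pvRoot_fix (pvRoot_spec hg hb).1
    have hf1 : pvF p2 kd.1 = kd.1 := by
      rcases hkdcases with ⟨h1, _⟩ | ⟨h1, _⟩ <;> rw [h1]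
      · exact hfa
      · exact hfb
    have hf2 : pvF p2 kd.2 = kd.2 := by
      rcases hkdcases with ⟨_, h2⟩ | ⟨_, h2⟩ <;> rw [h2]
      · exact hfb
      · exact hfa
    have hi1 : pvInR p2.length kd.1 := by
      rw [hlen2]
      rcases hkdcases with ⟨h1, _⟩ | ⟨h1, _⟩ <;> rw [h1]
      · exact (pvRoot_spec hg ha).2
      · exact (pvRoot_spec hg hb).2
    have hi2 : pvInR p2.length kd.2 := by
      rw [hlen2]
      rcases hkdcases with ⟨_, h2⟩ | ⟨_, h2⟩ <;> rw [h2]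
      · exact (pvRoot_spec hg hb).2
      · exact (pvRoot_spec hg ha).2
    have hne12 : kd.1 ≠ kd.2 := by
      rcases hkdcases with ⟨h1, h2⟩ | ⟨h1, h2⟩ <;> rw [h1, h2]
      · exact hrne
      · exact (Ne.symm hrne)
    obtain ⟨llen, lgood, lroots⟩ := pvLink f2good hi1 hi2 hf1 hf2 hne12
    refine ⟨fun y => if y = kd.1 then max (d kd.1) (d kd.2 + 1) else d y, ?_, ?_,
      fun x y hx hy => ?_⟩
    · rw [hstep, PySem.List.length_pySetD, hlen2]
    · rw [hstep]; exact lgood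
    · rw [hstep]
      have hx2 : pvInR p2.length x := by rw [hlen2]; exact hx
      have hy2 : pvInR p2.length y := by rw [hlen2]; exact hy
      rw [lroots x hx2, lroots y hy2, hroots2 x hx, hroots2 y hy]
      exact pvMerge_iff hrne hkdcases

def pvLab (lab : List Int) (x : Int) : Int := PySem.List.pyGetD lab x 0

def pvMinLab (lab : List Int) : Prop :=
  ∀ x, pvInR lab.length x → pvInR lab.length (pvLab lab x) ∧
    pvLab lab (pvLab lab x) = pvLab lab x ∧
    (∀ y, pvInR lab.length y → pvLab lab y = pvLab lab x → pvLab lab x ≤ y)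

def labStep (lab : List Int) (u v : Int) : List Int :=
  let lu := PySem.List.pyGetD lab u 0
  let lv := PySem.List.pyGetD lab v 0
  if lu ≠ lv then
    let m := if lu < lv then lu else lv
    lab.map (fun l => if l = lu ∨ l = lv then m else l)
  else lab

lemma pvLab_map (lab : List Int) (f : Int → Int) {x : Int} (hx : pvInR lab.length x) :
    pvLab (lab.map f) x = f (pvLab lab x) := by
  obtain ⟨h0, h1⟩ := hx
  rw [pvLab, pvLab,
      PySem.List.pyGetD_eq_getElem _ _ h0 (by simpa using h1),
      PySem.List.pyGetD_eq_getElem _ _ h0 h1, List.getElem_map]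

lemma labStep_length (lab : List Int) (u v : Int) :
    (labStep lab u v).length = lab.length := by
  rw [labStep]
  split_ifs <;> simp

lemma labStep_lab {lab : List Int} {u v : Int} (hne : PySem.List.pyGetD lab u 0 ≠ PySem.List.pyGetD lab v 0)
    {x : Int} (hx : pvInR lab.length x) :
    pvLab (labStep lab u v) x =
      (if pvLab lab x = pvLab lab u ∨ pvLab lab x = pvLab lab v
       then (if pvLab lab u < pvLab lab v then pvLab lab u else pvLab lab v)
       else pvLab lab x) := by
  rw [labStep, if_pos hne]
  exact pvLab_map lab _ hx

lemma labStep_lab_eq {lab : List Int} {u v : Int}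
    (heq : PySem.List.pyGetD lab u 0 = PySem.List.pyGetD lab v 0) :
    labStep lab u v = lab := by
  rw [labStep, if_neg (by simpa using heq)]

lemma pvRelabel_iff {lx ly lu lv m : Int} (hm : m = lu ∨ m = lv) (hne : lu ≠ lv) :
    ((if lx = lu ∨ lx = lv then m else lx) = (if ly = lu ∨ ly = lv then m else ly)) ↔
    (lx = ly ∨ ((lx = lu ∨ lx = lv) ∧ (ly = lu ∨ ly = lv))) := by
  split_ifs <;> omega

lemma labStep_iff {lab : List Int} {u v : Int} (hmin : pvMinLab lab)
    (hu : pvInR lab.length u) (hv : pvInR lab.length v) {x y : Int}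
    (hx : pvInR lab.length x) (hy : pvInR lab.length y) :
    pvLab (labStep lab u v) x = pvLab (labStep lab u v) y ↔
      (pvLab lab x = pvLab lab y ∨
        ((pvLab lab x = pvLab lab u ∨ pvLab lab x = pvLab lab v) ∧
         (pvLab lab y = pvLab lab u ∨ pvLab lab y = pvLab lab v))) := by
  by_cases heq : PySem.List.pyGetD lab u 0 = PySem.List.pyGetD lab v 0
  · rw [labStep_lab_eq heq]
    have h2 : pvLab lab u = pvLab lab v := heq
    constructor
    · intro h; exact Or.inl h
    · rintro (h | ⟨h1 | h1, h3 | h3⟩) <;> omega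
  · rw [labStep_lab heq hx, labStep_lab heq hy]
    exact pvRelabel_iff (by split_ifs <;> omega) (by exact heq)

lemma labStep_minlab {lab : List Int} {u v : Int} (hmin : pvMinLab lab)
    (hu : pvInR lab.length u) (hv : pvInR lab.length v) :
    pvMinLab (labStep lab u v) := by
  by_cases heq : PySem.List.pyGetD lab u 0 = PySem.List.pyGetD lab v 0
  · rw [labStep_lab_eq heq]; exact hmin
  · set lu := pvLab lab u with hlu
    set lv := pvLab lab v with hlv
    set m := if lu < lv then lu else lv with hm
    have hlu' : pvLab lab lu = lu := (hmin u hu).2.1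
    have hlv' : pvLab lab lv = lv := (hmin v hv).2.1
    have hlur : pvInR lab.length lu := (hmin u hu).1
    have hlvr : pvInR lab.length lv := (hmin v hv).1
    have hmr : pvInR lab.length m := by rw [hm]; split_ifs; exacts [hlur, hlvr]
    have hm' : pvLab lab m = m := by rw [hm]; split_ifs; exacts [hlu', hlv']
    have hmlu : m ≤ lu ∧ m ≤ lv := by rw [hm]; constructor <;> split_ifs <;> omega
    have hmem : m = lu ∨ m = lv := by rw [hm]; split_ifs; exacts [Or.inl rfl, Or.inr rfl]
    intro x hx
    rw [labStep_length] at hx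
    have e1 := labStep_lab heq hx
    rw [← hlu, ← hlv, ← hm] at e1
    constructor
    · rw [labStep_length, e1]
      split_ifs
      · exact hmr
      · exact (hmin x hx).1
    constructor
    · rw [e1]
      split_ifs with hc
      · have e2 := labStep_lab heq hmr
        rw [← hlu, ← hlv, ← hm, hm'] at e2
        rw [e2, if_pos hmem]
      · have e2 := labStep_lab heq (hmin x hx).1
        rw [← hlu, ← hlv, ← hm, (hmin x hx).2.1] at e2
        rw [e2, if_neg hc]
    · intro y hy hxy
      rw [labStep_length] at hy
      have e3 := labStep_lab heq hy
      rw [← hlu, ← hlv, ← hm] at e3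
      rw [e1] at hxy ⊢
      rw [e3] at hxy
      split_ifs with hc
      · by_cases hd : pvLab lab y = lu ∨ pvLab lab y = lv
        · rcases hd with h | h
          · have h5 := (hmin u hu).2.2 y hy (by rw [← hlu]; exact h)
            omega
          · have h5 := (hmin v hv).2.2 y hy (by rw [← hlv]; exact h)
            omega
        · rw [if_pos hc, if_neg hd] at hxy
          omega
      · by_cases hd : pvLab lab y = lu ∨ pvLab lab y = lv
        · rw [if_neg hc, if_pos hd] at hxy
          omega
        · rw [if_neg hc, if_neg hd] at hxy
          exact (hmin x hx).2.2 y hy hxy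

-- Python negative-index (wraparound) handling: inside Pre_'s range, an access at a negative flat
-- index reads/writes position i + length; both programs hit the same positions, so each DSU/label
-- step may first be normalised to the non-negative index.
def pvInW (n : Nat) (x : Int) : Prop := -(n:Int) ≤ x ∧ x < (n : Int)
def pvWrap (n : Nat) (x : Int) : Int := if x < 0 then x + n else x

lemma pvGetD_wrap (xs : List Int) (dflt : Int) {i : Int} (h0 : -(xs.length:Int) ≤ i) (h1 : i < 0)
    (hlt : (i + (xs.length:Int)).toNat < xs.length) :
    PySem.List.pyGetD xs i dflt = xs[(i + (xs.length:Int)).toNat] := by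
  have hk : i = -((((-i).toNat) : Nat) : Int) := by omega
  conv_lhs => rw [hk]
  rw [PySem.List.pyGetD_neg_natCast xs _ dflt (by omega) (by omega)]
  exact getElem_congr rfl (by omega) (by omega)

lemma pvSetD_wrap (xs : List Int) (v : Int) {i : Int} (h0 : -(xs.length:Int) ≤ i) (h1 : i < 0) :
    PySem.List.pySetD xs i v = xs.set (i + (xs.length:Int)).toNat v := by
  simp only [PySem.List.pySetD, PySem.List.pySet?, PySem.List.pyIdx?]
  rw [if_neg (by omega), if_pos h0]
  simp only [Option.map_some, Option.getD_some]
  congr 1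
  omega

lemma dsuFind_step (p : List Int) (x : Int) (f : Nat) :
    dsuFind (f+1) p x = if PySem.List.pyGetD p x x = x then (p, x)
      else dsuFind f
        (PySem.List.pySetD p x
          (PySem.List.pyGetD p (PySem.List.pyGetD p x x) (PySem.List.pyGetD p x x)))
        (PySem.List.pyGetD p (PySem.List.pyGetD p x x) (PySem.List.pyGetD p x x)) := rfl

lemma dsuFind_fixpt {p : List Int} {x : Int} (h : PySem.List.pyGetD p x x = x) (fuel : Nat) :
    dsuFind fuel p x = (p, x) := by
  cases fuel
  · rfl
  · rw [dsuFind_step, if_pos h]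

lemma dsuFind_wrap {p : List Int} {d : Int → Nat} (hg : pvGood p d) {u : Int}
    (h0 : -(p.length:Int) ≤ u) (h1 : u < 0) {fuel : Nat} (hfuel : 1 ≤ fuel) :
    dsuFind fuel p u = dsuFind fuel p (u + p.length) := by
  obtain ⟨f, rfl⟩ : ∃ f, fuel = f + 1 := ⟨fuel - 1, by omega⟩
  have hN : 0 < p.length := by omega
  have hwr : pvInR p.length (u + p.length) := ⟨by omega, by omega⟩
  have htn : (u + (p.length:Int)).toNat < p.length := by omega
  have hread : PySem.List.pyGetD p u u = p[(u + (p.length:Int)).toNat] :=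
    pvGetD_wrap p u h0 h1 htn
  have hread2 : PySem.List.pyGetD p (u + (p.length:Int)) (u + (p.length:Int)) =
      p[(u + (p.length:Int)).toNat] :=
    PySem.List.pyGetD_eq_getElem _ _ (by omega) (by omega)
  have hqr : pvInR p.length (p[(u + (p.length:Int)).toNat]) := by
    have h2 := (hg (u + p.length) hwr).1
    rw [pvF, hread2] at h2
    exact h2
  rw [dsuFind_step, dsuFind_step, hread, hread2]
  rw [if_neg (by have := hqr.1; omega)]
  by_cases hfix : p[(u + (p.length:Int)).toNat] = u + (p.length:Int)
  · rw [if_pos hfix]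
    have hqq : PySem.List.pyGetD p (p[(u + (p.length:Int)).toNat]) (p[(u + (p.length:Int)).toNat]) =
        p[(u + (p.length:Int)).toNat] := by
      rw [hfix, hread2]
      exact hfix
    rw [hqq]
    have hsetid : PySem.List.pySetD p u (p[(u + (p.length:Int)).toNat]) = p := by
      rw [pvSetD_wrap p _ h0 h1, List.set_getElem_self htn]
    rw [hsetid, hfix]
    exact dsuFind_fixpt (by rw [hread2, hfix]) f
  · rw [if_neg hfix]
    have hset : PySem.List.pySetD p u
        (PySem.List.pyGetD p (p[(u + (p.length:Int)).toNat]) (p[(u + (p.length:Int)).toNat])) =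
        PySem.List.pySetD p (u + (p.length:Int))
        (PySem.List.pyGetD p (p[(u + (p.length:Int)).toNat]) (p[(u + (p.length:Int)).toNat])) := by
      rw [pvSetD_wrap p _ h0 h1, PySem.List.pySetD_of_nonneg _ _ (by omega)]
    rw [hset]

lemma dsuUnion_wrap {p : List Int} {d : Int → Nat} (size : List Int) (hg : pvGood p d)
    {u v : Int} (hu : pvInW p.length u) (hv : pvInW p.length v) :
    dsuUnion p size u v = dsuUnion p size (pvWrap p.length u) (pvWrap p.length v) := by
  have hwu : pvInR p.length (pvWrap p.length u) := by
    unfold pvWrap; unfold pvInW at hu; split_ifs <;> exact ⟨by omega, by omega⟩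
  have hfindu : dsuFind p.length p u = dsuFind p.length p (pvWrap p.length u) := by
    unfold pvWrap
    split_ifs with h
    · exact dsuFind_wrap hg hu.1 h (by unfold pvInW at hu; omega)
    · rfl
  obtain ⟨f1r, f1len, f1good, f1roots⟩ := dsuFind_run hg hwu (le_refl _)
  have hfindv : dsuFind p.length (dsuFind p.length p (pvWrap p.length u)).1 v =
      dsuFind p.length (dsuFind p.length p (pvWrap p.length u)).1 (pvWrap p.length v) := by
    by_cases h : v < 0
    · have h2 := dsuFind_wrap (p := (dsuFind p.length p (pvWrap p.length u)).1) f1good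
        (u := v) (by rw [f1len]; exact hv.1) h (fuel := p.length)
        (by unfold pvInW at hv; omega)
      rw [f1len] at h2
      rw [h2]
      congr 1
      unfold pvWrap
      rw [if_pos h]
    · unfold pvWrap
      rw [if_neg h]
  simp only [dsuUnion]
  rw [hfindu, f1len, hfindv]

lemma labStep_wrap {lab : List Int} {u v : Int} (hu : pvInW lab.length u) (hv : pvInW lab.length v) :
    labStep lab u v = labStep lab (pvWrap lab.length u) (pvWrap lab.length v) := by
  have key : ∀ {x : Int}, pvInW lab.length x →
      PySem.List.pyGetD lab x 0 = PySem.List.pyGetD lab (pvWrap lab.length x) 0 := by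
    intro x hx
    unfold pvWrap
    split_ifs with h
    · rw [pvGetD_wrap lab 0 hx.1 h (by unfold pvInW at hx; omega),
        PySem.List.pyGetD_eq_getElem _ _ (by unfold pvInW at hx; omega)
          (by unfold pvInW at hx; omega)]
    · rfl
  rw [labStep, labStep, key hu, key hv]

def pvCoupled (n : Nat) (p lab : List Int) : Prop :=
  p.length = n ∧ lab.length = n ∧ (∃ d, pvGood p d) ∧ pvMinLab lab ∧
  ∀ x y, pvInR n x → pvInR n y → (pvRoot p x = pvRoot p y ↔ pvLab lab x = pvLab lab y)

lemma pvCoupled_step0 {n : Nat} {p size lab : List Int} {u v : Int}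
    (hc : pvCoupled n p lab) (hu : pvInR n u) (hv : pvInR n v) :
    pvCoupled n (dsuUnion p size u v).1 (labStep lab u v) := by
  obtain ⟨hlp, hll, ⟨d, hg⟩, hmin, hiff⟩ := hc
  obtain ⟨d', ulen, ugood, uiff⟩ := dsuUnion_spec size hg hlp hu hv
  have hu' : pvInR lab.length u := by rw [hll]; exact hu
  have hv' : pvInR lab.length v := by rw [hll]; exact hv
  refine ⟨ulen, by rw [labStep_length]; exact hll, ⟨d', ugood⟩,
    by
      have := labStep_minlab hmin hu' hv'
      exact this,
    fun x y hx hy => ?_⟩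
  have hx' : pvInR lab.length x := by rw [hll]; exact hx
  have hy' : pvInR lab.length y := by rw [hll]; exact hy
  rw [uiff x y hx hy, labStep_iff hmin hu' hv' hx' hy']
  have h1 := hiff x y hx hy
  have h2 := hiff x u hx hu
  have h3 := hiff x v hx hv
  have h4 := hiff y u hy hu
  have h5 := hiff y v hy hv
  have h6 := hiff u v hu hv
  constructor
  · rintro (h | ⟨ha | ha, hb | hb⟩)
    · exact Or.inl (h1.1 h)
    · exact Or.inr ⟨Or.inl (h2.1 ha), Or.inl (h4.1 hb)⟩
    · exact Or.inr ⟨Or.inl (h2.1 ha), Or.inr (h5.1 hb)⟩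
    · exact Or.inr ⟨Or.inr (h3.1 ha), Or.inl (h4.1 hb)⟩
    · exact Or.inr ⟨Or.inr (h3.1 ha), Or.inr (h5.1 hb)⟩
  · rintro (h | ⟨ha | ha, hb | hb⟩)
    · exact Or.inl (h1.2 h)
    · exact Or.inr ⟨Or.inl (h2.2 ha), Or.inl (h4.2 hb)⟩
    · exact Or.inr ⟨Or.inl (h2.2 ha), Or.inr (h5.2 hb)⟩
    · exact Or.inr ⟨Or.inr (h3.2 ha), Or.inl (h4.2 hb)⟩
    · exact Or.inr ⟨Or.inr (h3.2 ha), Or.inr (h5.2 hb)⟩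

lemma pvCoupled_step {n : Nat} {p size lab : List Int} {u v : Int}
    (hc : pvCoupled n p lab) (hu : pvInW n u) (hv : pvInW n v) :
    pvCoupled n (dsuUnion p size u v).1 (labStep lab u v) := by
  obtain ⟨hlp, hll, hex, hmin, hiff⟩ := hc
  obtain ⟨d, hg⟩ := hex
  have hup : pvInW p.length u := by rw [hlp]; exact hu
  have hvp : pvInW p.length v := by rw [hlp]; exact hv
  have hul : pvInW lab.length u := by rw [hll]; exact hu
  have hvl : pvInW lab.length v := by rw [hll]; exact hv
  rw [dsuUnion_wrap size hg hup hvp, labStep_wrap hul hvl]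
  have hweq : ∀ x : Int, pvWrap p.length x = pvWrap lab.length x := by
    intro x; rw [hlp, hll]
  rw [hweq u, hweq v]
  have hwu : pvInR n (pvWrap lab.length u) := by
    rw [hll]; unfold pvWrap; unfold pvInW at hul; split_ifs <;> exact ⟨by omega, by omega⟩
  have hwv : pvInR n (pvWrap lab.length v) := by
    rw [hll]; unfold pvWrap; unfold pvInW at hvl; split_ifs <;> exact ⟨by omega, by omega⟩
  exact pvCoupled_step0 ⟨hlp, hll, ⟨d, hg⟩, hmin, hiff⟩ hwu hwv

lemma pvPhase1 {n : Nat} (E : List (Int × Int)) :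
    ∀ (p size lab : List Int), pvCoupled n p lab →
      (∀ e ∈ E, pvInW n e.1 ∧ pvInW n e.2) →
      pvCoupled n
        (E.foldl (fun st (e : Int × Int) => dsuUnion st.1 st.2 e.1 e.2) (p, size)).1
        (E.foldl (fun lab (e : Int × Int) => labStep lab e.1 e.2) lab) := by
  induction E with
  | nil => intro p size lab hc _; exact hc
  | cons e E ih =>
    intro p size lab hc hE
    have he := hE e (List.mem_cons_self ..)
    have hstep := pvCoupled_step (size := size) hc he.1 he.2
    simp only [List.foldl_cons]
    have : (dsuUnion p size e.1 e.2) =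
        ((dsuUnion p size e.1 e.2).1, (dsuUnion p size e.1 e.2).2) := rfl
    rw [this]
    exact ih _ _ _ hstep (fun e' he' => hE e' (List.mem_cons_of_mem _ he'))

lemma pvRange_lab (N : Nat) {x : Int} (hx : pvInR N x) :
    PySem.List.pyGetD (PySem.List.pyRange 0 (N:Int) 1) x x = x ∧
    PySem.List.pyGetD (PySem.List.pyRange 0 (N:Int) 1) x 0 = x := by
  obtain ⟨h0, h1⟩ := hx
  have hlen : (PySem.List.pyRange 0 (N:Int) 1).length = N := by
    rw [PySem.List.length_pyRange_one]; omega
  have hget : ∀ dflt : Int, PySem.List.pyGetD (PySem.List.pyRange 0 (N:Int) 1) x dflt = x := by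
    intro dflt
    rw [PySem.List.pyGetD_eq_getElem _ _ h0 (by rw [hlen]; exact_mod_cast h1)]
    rw [PySem.List.getElem_pyRange_one]
    omega
  exact ⟨hget x, hget 0⟩

lemma pvInit (N : Nat) :
    pvCoupled N (PySem.List.pyRange 0 (N:Int) 1) (PySem.List.pyRange 0 (N:Int) 1) := by
  have hlen : (PySem.List.pyRange 0 (N:Int) 1).length = N := by
    rw [PySem.List.length_pyRange_one]; omega
  have hF : ∀ x, pvInR N x → pvF (PySem.List.pyRange 0 (N:Int) 1) x = x :=
    fun x hx => (pvRange_lab N hx).1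
  have hL : ∀ x, pvInR N x → pvLab (PySem.List.pyRange 0 (N:Int) 1) x = x :=
    fun x hx => (pvRange_lab N hx).2
  have hroot : ∀ x, pvInR N x → pvRoot (PySem.List.pyRange 0 (N:Int) 1) x = x :=
    fun x hx => pvRoot_fix (hF x hx)
  refine ⟨hlen, hlen, ⟨fun _ => 0, fun x hx => ?_⟩, fun x hx => ?_, fun x y hx hy => ?_⟩
  · rw [hlen] at hx
    rw [hF x hx]
    exact ⟨by rw [hlen]; exact hx, fun h => absurd rfl h⟩
  · rw [hlen] at hx
    rw [hL x hx]
    exact ⟨by rw [hlen]; exact hx, by rw [hL x hx], fun y hy hxy => by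
      rw [hlen] at hy
      rw [hL y hy] at hxy
      omega⟩
  · rw [hroot x hx, hroot y hy, hL x hx, hL y hy]

def grpStep (K : Int → Int) (st : PySem.Dict Int (List (Int × Int))) (gv : Int × (Int × Int)) :
    PySem.Dict Int (List (Int × Int)) :=
  st.modify (K gv.1) [] (fun l => l ++ [gv.2])

lemma pvModify_eq_insert (d : PySem.Dict Int (List (Int × Int))) (k : Int)
    (d0 : List (Int × Int)) (f : List (Int × Int) → List (Int × Int)) :
    d.modify k d0 f = d.insert k (f (d.getD k d0)) := by
  simp [PySem.Dict.modify, PySem.Dict.insert, PySem.Dict.getD]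

lemma pvKeys_eq_items_fst (d : PySem.Dict Int (List (Int × Int))) :
    d.keys = d.items.map (·.1) := by
  simp [PySem.Dict.keys]

lemma pvValues_eq_items_snd (d : PySem.Dict Int (List (Int × Int))) :
    d.values = d.items.map (·.2) := by
  simp [PySem.Dict.values]

lemma grp_items (K : Int → Int) (l : List (Int × (Int × Int))) :
    (l.foldl (grpStep K) PySem.Dict.empty).items =
      (PySem.List.dedup (l.map (fun gv => K gv.1))).map
        (fun k => (k, (l.filter (fun gv => K gv.1 == k)).map (fun gv => gv.2))) := by
  induction l using List.reverseRecOn with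
  | nil => simp [PySem.Dict.empty, PySem.List.dedup]
  | append_singleton l gv ih =>
    rw [List.foldl_append, List.foldl_cons, List.foldl_nil]
    set D := l.foldl (grpStep K) PySem.Dict.empty with hD
    have hkeys : D.keys = PySem.List.dedup (l.map (fun gv => K gv.1)) := by
      rw [pvKeys_eq_items_fst, ih, List.map_map]
      simp [Function.comp_def]
    have hnodup : D.keys.Nodup := by
      rw [hkeys, PySem.List.dedup_eq_ofList]
      exact PySem.Set.nodup_ofList _
    have hstep : grpStep K D gv = D.insert (K gv.1) (D.getD (K gv.1) [] ++ [gv.2]) :=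
      pvModify_eq_insert D (K gv.1) [] _
    rw [hstep]
    by_cases hm : K gv.1 ∈ l.map (fun gv => K gv.1)
    · have hcont : D.contains (K gv.1) = true := by
        rw [PySem.Dict.contains_eq_decide_mem_keys, hkeys]
        simp [PySem.List.dedup_eq_ofList, PySem.Set.mem_ofList, hm]
      have hmemit : (K gv.1, (l.filter (fun gv' => K gv'.1 == K gv.1)).map (fun gv => gv.2)) ∈ D.items := by
        rw [ih]
        apply List.mem_map_of_mem
        rw [PySem.List.dedup_eq_ofList]
        exact (PySem.Set.mem_ofList _ _).2 hm
      have hgetD : D.getD (K gv.1) [] = (l.filter (fun gv' => K gv'.1 == K gv.1)).map (fun gv => gv.2) :=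
        PySem.Dict.getD_of_mem_items D hmemit hnodup []
      rw [PySem.Dict.items_insert_of_contains D _ hcont, ih]
      have hded : PySem.List.dedup ((l ++ [gv]).map (fun gv => K gv.1)) =
          PySem.List.dedup (l.map (fun gv => K gv.1)) := by
        rw [List.map_append, List.map_singleton]
        simp [pysem, hm]
      rw [hded, List.map_map]
      apply List.map_congr_left
      intro k hk
      by_cases hkk : k = K gv.1
      · subst hkk
        simp only [Function.comp_apply, beq_self_eq_true, if_true]
        rw [hgetD, List.filter_append]
        simp
      · have hbeq : (k == K gv.1) = false := by simp [hkk]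
        simp only [Function.comp_apply, hbeq, Bool.false_eq_true, if_false]
        rw [List.filter_append]
        have hemp : List.filter (fun gv' => K gv'.1 == k) [gv] = [] := by
          simp
          intro h
          exact absurd h.symm hkk
        rw [hemp, List.append_nil]
    · have hcont : D.contains (K gv.1) = false := by
        rw [PySem.Dict.contains_eq_decide_mem_keys, hkeys]
        simp [PySem.List.dedup_eq_ofList, PySem.Set.mem_ofList, hm]
      have hgetD : D.getD (K gv.1) [] = [] := by
        apply PySem.Dict.getD_of_not_contains
        exact hcont
      rw [PySem.Dict.items_insert_of_not_contains D _ hcont, ih, hgetD]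
      have hded : PySem.List.dedup ((l ++ [gv]).map (fun gv => K gv.1)) =
          PySem.List.dedup (l.map (fun gv => K gv.1)) ++ [K gv.1] := by
        rw [List.map_append, List.map_singleton]
        simp [pysem, hm]
      rw [hded, List.map_append]
      congr 1
      · apply List.map_congr_left
        intro k hk
        have hkmem : k ∈ l.map (fun gv => K gv.1) := by
          rw [PySem.List.dedup_eq_ofList] at hk
          exact (PySem.Set.mem_ofList _ _).1 hk
        have hkk : k ≠ K gv.1 := fun h => hm (h ▸ hkmem)
        rw [List.filter_append]
        have hemp : List.filter (fun gv' => K gv'.1 == k) [gv] = [] := by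
          simp
          intro h
          exact absurd h.symm hkk
        rw [hemp, List.append_nil]
      · have hfl : List.filter (fun gv' => K gv'.1 == K gv.1) l = [] := by
          rw [List.filter_eq_nil_iff]
          intro gv' hgv' hbad
          apply hm
          rw [List.mem_map]
          exact ⟨gv', hgv', by simpa using hbad⟩
        rw [List.map_singleton, List.filter_append, hfl]
        simp

lemma pvPhase2A {n : Nat} {pStar : List Int} {d : Int → Nat} :
    ∀ (l : List (Int × (Int × Int))) (st : PySem.Dict Int (List (Int × Int)) × List Int),
      st.2.length = n → pvGood st.2 d → (∀ y, pvInR n y → pvRoot st.2 y = pvRoot pStar y) →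
      (∀ gv ∈ l, pvInR n gv.1) →
      (l.foldl (fun st (gv : Int × (Int × Int)) =>
          (st.1.modify (dsuFind st.2.length st.2 gv.1).2 [] (fun ll => ll ++ [gv.2]),
           (dsuFind st.2.length st.2 gv.1).1)) st).1 =
        l.foldl (grpStep (fun g => pvRoot pStar g)) st.1 := by
  intro l
  induction l with
  | nil => intro st _ _ _ _; rfl
  | cons gv l ih =>
    intro st hlen hg hroots hmem
    have hin : pvInR n gv.1 := hmem gv (List.mem_cons_self ..)
    have hin' : pvInR st.2.length gv.1 := by rw [hlen]; exact hin
    obtain ⟨fr, flen, fgood, froots⟩ := dsuFind_run hg hin' (le_refl _)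
    simp only [List.foldl_cons]
    have hkey : (dsuFind st.2.length st.2 gv.1).2 = pvRoot pStar gv.1 := by
      rw [fr]; exact hroots gv.1 hin
    rw [hkey]
    exact ih (st.1.modify (pvRoot pStar gv.1) [] (fun ll => ll ++ [gv.2]),
        (dsuFind st.2.length st.2 gv.1).1)
      (by rw [flen]; exact hlen) fgood
      (fun y hy => by rw [froots y (by rw [hlen]; exact hy)]; exact hroots y hy)
      (fun gv' h => hmem gv' (List.mem_cons_of_mem _ h))

lemma pvBridge {n : Nat} {pStar lab : List Int} (hc : pvCoupled n pStar lab) :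
    ∀ m : Nat, m ≤ n →
      PySem.List.dedup ((PySem.List.pyRange 0 (m:Int) 1).map (fun g => pvRoot pStar g)) =
        ((PySem.List.pyRange 0 (m:Int) 1).filter (fun s => pvLab lab s == s)).map
          (fun g => pvRoot pStar g) := by
  obtain ⟨hlp, hll, hgood, hmin, hiff⟩ := hc
  intro m
  induction m with
  | zero =>
    intro _
    rw [PySem.List.pyRange_one_eq_nil (by norm_num)]
    simp [PySem.List.dedup]
  | succ m ih =>
    intro hm1
    have hm : m ≤ n := by omega
    have hstep : PySem.List.pyRange 0 (((m+1:Nat)):Int) 1 =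
        PySem.List.pyRange 0 (m:Int) 1 ++ [(m:Int)] := by
      push_cast
      exact PySem.List.pyRange_one_succ_right (by positivity)
    rw [hstep, List.map_append, List.map_singleton, List.filter_append]
    have hmr : pvInR n (m:Int) := ⟨by positivity, by exact_mod_cast hm1⟩
    have hmr' : pvInR lab.length (m:Int) := by rw [hll]; exact hmr
    by_cases hLm : pvLab lab (m:Int) = (m:Int)
    · have hnotmem : pvRoot pStar (m:Int) ∉
          (PySem.List.pyRange 0 (m:Int) 1).map (fun g => pvRoot pStar g) := by
        intro hmem
        rw [List.mem_map] at hmem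
        obtain ⟨g, hg, hKg⟩ := hmem
        rw [PySem.List.mem_pyRange_one] at hg
        have hgr : pvInR n g := ⟨hg.1, by omega⟩
        have hlabeq : pvLab lab g = pvLab lab (m:Int) := (hiff g (m:Int) hgr hmr).1 hKg
        have hle := (hmin g (by rw [hll]; exact hgr)).2.2 g (by rw [hll]; exact hgr) rfl
        rw [hlabeq, hLm] at hle
        omega
      rw [show PySem.List.dedup ((PySem.List.pyRange 0 (m:Int) 1).map (fun g => pvRoot pStar g)
            ++ [pvRoot pStar (m:Int)]) =
          PySem.List.dedup ((PySem.List.pyRange 0 (m:Int) 1).map (fun g => pvRoot pStar g))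
            ++ [pvRoot pStar (m:Int)] by simp [pysem, hnotmem]]
      have hfilt : List.filter (fun s => pvLab lab s == s) [(m:Int)] = [(m:Int)] := by
        simp [hLm]
      rw [hfilt, List.map_append, List.map_singleton, ih hm]
    · have hmem : pvRoot pStar (m:Int) ∈
          (PySem.List.pyRange 0 (m:Int) 1).map (fun g => pvRoot pStar g) := by
        rw [List.mem_map]
        refine ⟨pvLab lab (m:Int), ?_, ?_⟩
        · rw [PySem.List.mem_pyRange_one]
          have h1 := (hmin (m:Int) hmr').1
          have h2 := (hmin (m:Int) hmr').2.2 (m:Int) hmr' rfl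
          exact ⟨h1.1, by omega⟩
        · apply (hiff _ _ _ hmr).2
          · exact (hmin (m:Int) hmr').2.1
          · have h1 := (hmin (m:Int) hmr').1
            rw [hll] at h1
            exact h1
      rw [show PySem.List.dedup ((PySem.List.pyRange 0 (m:Int) 1).map (fun g => pvRoot pStar g)
            ++ [pvRoot pStar (m:Int)]) =
          PySem.List.dedup ((PySem.List.pyRange 0 (m:Int) 1).map (fun g => pvRoot pStar g))
          by simp [pysem, hmem]]
      have hfilt : List.filter (fun s => pvLab lab s == s) [(m:Int)] = [] := by
        simp [hLm]
      rw [hfilt, List.append_nil, ih hm]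

lemma pvFilter_map_comm (l : List Int) (p : Int → Bool) (f : Int → List (Int × Int))
    (q : List (Int × Int) → Bool) :
    ((l.filter p).map f).filter q = (l.filter (fun s => p s && q (f s))).map f := by
  induction l with
  | nil => rfl
  | cons x l ih =>
    by_cases hp : p x
    · by_cases hq : q (f x) <;> simp [hp, hq, ih]
    · simp [hp, ih]

lemma pvOg_spec (kps : List (List (Int × Int))) :
    kps.foldl (fun (acc : List Int × Int) kp => (acc.1 ++ [acc.2], acc.2 + kp.length)) ([], 0) =
      ((List.range kps.length).map (fun k => (pvOff kps k : Int)), (pvN kps : Int)) := by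
  suffices h : ∀ (kps : List (List (Int × Int))) (acc : List Int) (c : Int),
      kps.foldl (fun (acc : List Int × Int) kp => (acc.1 ++ [acc.2], acc.2 + kp.length)) (acc, c) =
      (acc ++ (List.range kps.length).map (fun k => c + (pvOff kps k : Int)),
        c + (pvN kps : Int)) by
    have h2 := h kps [] 0
    simpa using h2
  intro kps
  induction kps with
  | nil =>
    intro acc c
    simp [pvOff, pvN]
  | cons kp kps ih =>
    intro acc c
    rw [List.foldl_cons, ih (acc ++ [c]) (c + kp.length)]
    refine Prod.ext ?_ ?_
    · show acc ++ [c] ++ (List.range kps.length).map (fun k => (c + kp.length) + (pvOff kps k : Int)) =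
        acc ++ (List.range (kp :: kps).length).map (fun k => c + (pvOff (kp :: kps) k : Int))
      rw [List.append_assoc, List.length_cons, List.range_succ_eq_map, List.map_cons,
        List.map_map, List.singleton_append]
      congr 2
      · simp [pvOff]
      · apply List.map_congr_left
        intro k _
        simp only [Function.comp_apply, pvOff, List.take_succ_cons, List.map_cons, List.sum_cons]
        push_cast
        ring
    · show c + kp.length + (pvN kps : Int) = c + (pvN (kp :: kps) : Int)
      simp only [pvN, List.map_cons, List.sum_cons]
      push_cast
      ring

def pvNodes (kps : List (List (Int × Int))) : List (Int × Int) :=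
  (PySem.List.enumerate kps 0).flatMap
    (fun ik => (PySem.List.pyRange 0 ik.2.length 1).map (fun idx => (ik.1, idx)))

lemma pvEnum_map_range {α : Type} (M : Nat) (f : Nat → α) (s : Int) :
    PySem.List.enumerate ((List.range M).map f) s =
      (List.range M).map (fun k : Nat => (s + (k : Int), f k)) := by
  induction M with
  | zero => simp [PySem.List.enumerate_nil]
  | succ M ih =>
    rw [List.range_succ, List.map_append, List.map_append,
      PySem.List.enumerate_append, ih]
    congr 1
    simp [PySem.List.enumerate_cons, PySem.List.enumerate_nil]

lemma pvEnum_map_pyRange (m : Int) (img : Int) (s : Int) :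
    PySem.List.enumerate ((PySem.List.pyRange 0 m 1).map (fun idx => (img, idx))) s =
      (PySem.List.pyRange 0 m 1).map (fun idx => (s + idx, (img, idx))) := by
  rw [PySem.List.pyRange_one, List.map_map, List.map_map, pvEnum_map_range]
  apply List.map_congr_left
  intro k _
  simp

lemma pvNodes_append (kps : List (List (Int × Int))) (kp : List (Int × Int)) :
    pvNodes (kps ++ [kp]) =
      pvNodes kps ++ (PySem.List.pyRange 0 kp.length 1).map (fun idx => ((kps.length : Int), idx)) := by
  rw [pvNodes, pvNodes, PySem.List.enumerate_append, List.flatMap_append]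
  congr 1
  simp [PySem.List.enumerate_cons, PySem.List.enumerate_nil]

lemma pvNodes_length (kps : List (List (Int × Int))) : (pvNodes kps).length = pvN kps := by
  induction kps using List.reverseRecOn with
  | nil => simp [pvNodes, pvN, PySem.List.enumerate_nil]
  | append_singleton kps kp ih =>
    rw [pvNodes_append, List.length_append, ih, List.length_map,
      PySem.List.length_pyRange_one]
    simp [pvN]

lemma pvLA_eq : ∀ (kps : List (List (Int × Int))) (offs : List Int),
    (∀ k : Nat, k < kps.length → PySem.List.pyGetD offs (k : Int) 0 = (pvOff kps k : Int)) →
    (PySem.List.enumerate kps 0).flatMap (fun ik =>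
        (PySem.List.pyRange 0 ik.2.length 1).map (fun idx =>
          (PySem.List.pyGetD offs ik.1 0 + idx, (ik.1, idx)))) =
      PySem.List.enumerate (pvNodes kps) 0 := by
  intro kps
  induction kps using List.reverseRecOn with
  | nil => intro offs _; simp [pvNodes, PySem.List.enumerate_nil]
  | append_singleton kps kp ih =>
    intro offs hoffs
    rw [PySem.List.enumerate_append, List.flatMap_append, pvNodes_append,
      PySem.List.enumerate_append, pvNodes_length]
    congr 1
    · apply ih
      intro k hk
      rw [hoffs k (by rw [List.length_append]; omega)]
      congr 1
      rw [pvOff, pvOff, List.take_append_of_le_length (by omega)]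
    · have hval : PySem.List.pyGetD offs ((0:Int) + (kps.length : Int)) 0 = ((pvN kps : Nat) : Int) := by
        rw [zero_add, show ((kps.length : Nat) : Int) = ((kps.length : Nat) : Int) from rfl,
          hoffs kps.length (by rw [List.length_append]; simp)]
        congr 1
        rw [pvOff, List.take_append_of_le_length (le_refl _), List.take_of_length_le (le_refl _), pvN]
      simp only [PySem.List.enumerate_cons, PySem.List.enumerate_nil, List.flatMap_cons,
        List.flatMap_nil, List.append_nil]
      rw [hval, pvEnum_map_pyRange]
      apply List.map_congr_left
      intro idx _
      simp

lemma pvOffs_get (kps : List (List (Int × Int))) {i : Int} (h0 : 0 ≤ i) (h1 : i < kps.length) :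
    PySem.List.pyGetD ((List.range kps.length).map (fun k => (pvOff kps k : Int))) i 0 =
      (pvOff kps i.toNat : Int) := by
  rw [PySem.List.pyGetD_eq_getElem _ _ h0 (by simpa using h1)]
  rw [List.getElem_map, List.getElem_range]


lemma pvNested2 {γ : Type} (md : List (Int × Int × List (Int × Int)))
    (F : γ → Int → Int → γ) (u v : Int × Int × List (Int × Int) → Int × Int → Int)
    (init : γ) :
    md.foldl (fun st e => e.2.2.foldl (fun st ab => F st (u e ab) (v e ab)) st) init =
      (md.flatMap (fun e => e.2.2.map (fun ab => (u e ab, v e ab)))).foldl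
        (fun st q => F st q.1 q.2) init := by
  rw [List.foldl_flatMap]
  congr 1
  funext st e
  rw [List.foldl_map]

lemma pvNested3 {γ : Type} (kps : List (List (Int × Int)))
    (F : γ → Int → Int × Int → γ) (u : Int × List (Int × Int) → Int → Int) (init : γ) :
    (PySem.List.enumerate kps 0).foldl
      (fun st ik => (PySem.List.pyRange 0 ik.2.length 1).foldl
        (fun st idx => F st (u ik idx) (ik.1, idx)) st) init =
      ((PySem.List.enumerate kps 0).flatMap (fun ik =>
        (PySem.List.pyRange 0 ik.2.length 1).map (fun idx => (u ik idx, (ik.1, idx))))).foldl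
        (fun st q => F st q.1 q.2) init := by
  rw [List.foldl_flatMap]
  congr 1
  funext st ik
  rw [List.foldl_map]

lemma pvOffs_get_all (kps : List (List (Int × Int))) {i : Int}
    (h0 : -(kps.length:Int) ≤ i) (h1 : i < kps.length) :
    PySem.List.pyGetD ((List.range kps.length).map (fun k => (pvOff kps k : Int))) i 0 =
      (pvOff kps (pvWrapIdx kps.length i) : Int) := by
  have hlen : ((List.range kps.length).map (fun k => (pvOff kps k : Int))).length = kps.length := by
    simp
  by_cases h : i < 0
  · rw [pvGetD_wrap _ 0 (by rw [hlen]; exact h0) h (by rw [hlen]; omega)]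
    rw [List.getElem_map, List.getElem_range]
    unfold pvWrapIdx
    rw [if_pos h]
    congr 2
    rw [hlen]
  · rw [pvOffs_get kps (by omega) h1]
    unfold pvWrapIdx
    rw [if_neg h]

lemma pvE_bounds (kps : List (List (Int × Int))) (md : List (Int × Int × List (Int × Int)))
    (hpre : ∀ e ∈ md,
      -(kps.length : Int) ≤ e.1 ∧ e.1 < kps.length ∧
      -(kps.length : Int) ≤ e.2.1 ∧ e.2.1 < kps.length ∧
      ∀ ab ∈ e.2.2,
        -((pvN kps : Nat) : Int) ≤ (pvOff kps (pvWrapIdx kps.length e.1) : Int) + ab.1 ∧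
        (pvOff kps (pvWrapIdx kps.length e.1) : Int) + ab.1 < ((pvN kps : Nat) : Int) ∧
        -((pvN kps : Nat) : Int) ≤ (pvOff kps (pvWrapIdx kps.length e.2.1) : Int) + ab.2 ∧
        (pvOff kps (pvWrapIdx kps.length e.2.1) : Int) + ab.2 < ((pvN kps : Nat) : Int)) :
    ∀ q ∈ md.flatMap (fun e => e.2.2.map (fun ab =>
        (PySem.List.pyGetD ((List.range kps.length).map (fun k => (pvOff kps k : Int))) e.1 0 + ab.1,
         PySem.List.pyGetD ((List.range kps.length).map (fun k => (pvOff kps k : Int))) e.2.1 0 + ab.2))),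
      pvInW (pvN kps) q.1 ∧ pvInW (pvN kps) q.2 := by
  intro q hq
  rw [List.mem_flatMap] at hq
  obtain ⟨e, he, hq⟩ := hq
  rw [List.mem_map] at hq
  obtain ⟨ab, hab, rfl⟩ := hq
  obtain ⟨h1, h2, h3, h4, h5⟩ := hpre e he
  obtain ⟨a1, a2, a3, a4⟩ := h5 ab hab
  constructor
  · show pvInW (pvN kps) (PySem.List.pyGetD _ e.1 0 + ab.1)
    rw [pvOffs_get_all kps h1 h2]
    exact ⟨a1, a2⟩
  · show pvInW (pvN kps) (PySem.List.pyGetD _ e.2.1 0 + ab.2)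
    rw [pvOffs_get_all kps h3 h4]
    exact ⟨a3, a4⟩

theorem pvMain (kps : List (List (Int × Int))) (md : List (Int × Int × List (Int × Int)))
    (hpre : Pre_build_tracks kps md) : build_tracks kps md = build_tracks_alt kps md := by
  obtain ⟨-, hpre⟩ := hpre
  simp only [build_tracks, build_tracks_alt, pvOg_spec]
  rw [pvNested2 md (fun st a b => dsuUnion st.1 st.2 a b)
    (fun e ab => PySem.List.pyGetD ((List.range kps.length).map (fun k => (pvOff kps k : Int))) e.1 0 + ab.1)
    (fun e ab => PySem.List.pyGetD ((List.range kps.length).map (fun k => (pvOff kps k : Int))) e.2.1 0 + ab.2)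
    (PySem.List.pyRange 0 ((pvN kps : Nat) : Int) 1, PySem.List.pyRepeat [1] ((pvN kps : Nat) : Int))]
  rw [pvNested2 md (fun lab a b =>
      if PySem.List.pyGetD lab a 0 ≠ PySem.List.pyGetD lab b 0 then
        List.map (fun l =>
          if l = PySem.List.pyGetD lab a 0 ∨ l = PySem.List.pyGetD lab b 0 then
            if PySem.List.pyGetD lab a 0 < PySem.List.pyGetD lab b 0 then PySem.List.pyGetD lab a 0
            else PySem.List.pyGetD lab b 0
          else l) lab
      else lab)
    (fun e ab => PySem.List.pyGetD ((List.range kps.length).map (fun k => (pvOff kps k : Int))) e.1 0 + ab.1)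
    (fun e ab => PySem.List.pyGetD ((List.range kps.length).map (fun k => (pvOff kps k : Int))) e.2.1 0 + ab.2)
    (PySem.List.pyRange 0 ((pvN kps : Nat) : Int) 1)]
  have hlabfn : (fun (lab : List Int) (q : Int × Int) =>
      if PySem.List.pyGetD lab q.1 0 ≠ PySem.List.pyGetD lab q.2 0 then
        List.map (fun l =>
          if l = PySem.List.pyGetD lab q.1 0 ∨ l = PySem.List.pyGetD lab q.2 0 then
            if PySem.List.pyGetD lab q.1 0 < PySem.List.pyGetD lab q.2 0 then PySem.List.pyGetD lab q.1 0
            else PySem.List.pyGetD lab q.2 0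
          else l) lab
      else lab) = (fun (lab : List Int) (q : Int × Int) => labStep lab q.1 q.2) := rfl
  rw [hlabfn]
  rw [pvNested3 (γ := PySem.Dict Int (List (Int × Int)) × List Int) kps (fun st g pr =>
      (st.1.modify (dsuFind st.2.length st.2 g).2 [] (fun l => l ++ [pr]),
       (dsuFind st.2.length st.2 g).1))
    (fun ik idx => PySem.List.pyGetD ((List.range kps.length).map (fun k => (pvOff kps k : Int))) ik.1 0 + idx)]
  rw [pvLA_eq kps ((List.range kps.length).map (fun k => (pvOff kps k : Int)))
    (fun k hk => by
      rw [pvOffs_get kps (by positivity) (by exact_mod_cast hk)]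
      simp)]
  have hnodes : (PySem.List.enumerate kps 0).foldl
      (fun acc (ik : Int × List (Int × Int)) =>
        acc ++ (PySem.List.pyRange 0 (ik.2.length : Int) 1).map (fun idx => (ik.1, idx))) [] =
      pvNodes kps := by
    rw [PySem.List.foldl_append_eq_flatMap, List.nil_append, pvNodes]
  rw [hnodes]
  set EE := md.flatMap (fun e => e.2.2.map (fun ab =>
    (PySem.List.pyGetD ((List.range kps.length).map (fun k => (pvOff kps k : Int))) e.1 0 + ab.1,
     PySem.List.pyGetD ((List.range kps.length).map (fun k => (pvOff kps k : Int))) e.2.1 0 + ab.2))) with hEE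
  set PSTAR := (EE.foldl (fun st (q : Int × Int) => dsuUnion st.1 st.2 q.1 q.2)
    (PySem.List.pyRange 0 ((pvN kps : Nat) : Int) 1,
     PySem.List.pyRepeat [1] ((pvN kps : Nat) : Int))).1 with hPSTAR
  set LAB := EE.foldl (fun lab (q : Int × Int) => labStep lab q.1 q.2)
    (PySem.List.pyRange 0 ((pvN kps : Nat) : Int) 1) with hLAB
  have hC : pvCoupled (pvN kps) PSTAR LAB := by
    rw [hPSTAR, hLAB]
    exact pvPhase1 EE _ _ _ (pvInit (pvN kps)) (pvE_bounds kps md hpre)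
  obtain ⟨hlenP, hlenL, ⟨dS, hgood⟩, hminL, hiffC⟩ := hC
  have hmemnodes : ∀ gv ∈ PySem.List.enumerate (pvNodes kps) 0, pvInR (pvN kps) gv.1 := by
    intro gv hgv
    rw [PySem.List.mem_enumerate_iff] at hgv
    obtain ⟨k, hk, rfl⟩ := hgv
    rw [pvNodes_length] at hk
    exact ⟨by positivity, by push_cast; omega⟩
  rw [pvPhase2A (pStar := PSTAR) (d := dS) (PySem.List.enumerate (pvNodes kps) 0)
    (PySem.Dict.empty, PSTAR) hlenP hgood (fun y _ => rfl) hmemnodes]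
  rw [pvValues_eq_items_snd, grp_items, List.map_map]
  have hC2 : pvCoupled (pvN kps) PSTAR LAB := ⟨hlenP, hlenL, ⟨dS, hgood⟩, hminL, hiffC⟩
  have hEn : PySem.List.enumerate (pvNodes kps) 0 =
      (PySem.List.pyRange 0 ((pvN kps : Nat) : Int) 1).map
        (fun j => (j, PySem.List.pyGetD (pvNodes kps) j ((0:Int), (0:Int)))) := by
    rw [PySem.List.enumerate_eq_map_pyRange (pvNodes kps) ((0:Int),(0:Int)),
      show PySem.List.len (pvNodes kps) = ((pvN kps : Nat) : Int) by
        simp [PySem.List.len, pvNodes_length]]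
  have hmapK : (PySem.List.enumerate (pvNodes kps) 0).map (fun gv => pvRoot PSTAR gv.1) =
      (PySem.List.pyRange 0 ((pvN kps : Nat) : Int) 1).map (fun g => pvRoot PSTAR g) := by
    rw [hEn, List.map_map]
    rfl
  have hcomp : ((fun (x : Int × List (Int × Int)) => x.2) ∘ fun k =>
      (k, List.map (fun gv => gv.2)
        (List.filter (fun gv => pvRoot PSTAR gv.1 == k) (PySem.List.enumerate (pvNodes kps) 0)))) =
      fun k => ((PySem.List.pyRange 0 ((pvN kps : Nat) : Int) 1).filter
          (fun g => pvRoot PSTAR g == k)).map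
          (fun g => PySem.List.pyGetD (pvNodes kps) g ((0:Int),(0:Int))) := by
    funext k
    simp only [Function.comp_def]
    rw [hEn, List.filter_map, List.map_map]
    rfl
  rw [hcomp, hmapK, pvBridge hC2 (pvN kps) (le_refl _), List.map_map]
  have hGmem : ∀ g : Int, g ∈ PySem.List.pyRange 0 ((pvN kps : Nat) : Int) 1 → pvInR (pvN kps) g := by
    intro g hg
    rw [PySem.List.mem_pyRange_one] at hg
    exact ⟨hg.1, hg.2⟩
  have hcomp2 : ∀ s ∈ (PySem.List.pyRange 0 ((pvN kps : Nat) : Int) 1).filter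
      (fun s => pvLab LAB s == s),
      ((fun k => ((PySem.List.pyRange 0 ((pvN kps : Nat) : Int) 1).filter
          (fun g => pvRoot PSTAR g == k)).map
          (fun g => PySem.List.pyGetD (pvNodes kps) g ((0:Int),(0:Int)))) ∘
        (fun g => pvRoot PSTAR g)) s =
      ((PySem.List.pyRange 0 ((pvN kps : Nat) : Int) 1).filter
          (fun g => decide (PySem.List.pyGetD LAB g 0 = s))).map
          (fun g => PySem.List.pyGetD (pvNodes kps) g ((0:Int),(0:Int))) := by
    intro s hs
    rw [List.mem_filter] at hs
    obtain ⟨hsG, hsrep⟩ := hs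
    have hss : pvLab LAB s = s := by simpa using hsrep
    have hsr := hGmem s hsG
    simp only [Function.comp_def]
    congr 1
    apply List.filter_congr
    intro g hg
    have hgr := hGmem g hg
    have hiff2 := hiffC g s hgr hsr
    by_cases h : pvRoot PSTAR g = pvRoot PSTAR s
    · have : PySem.List.pyGetD LAB g 0 = s := by
        have := hiff2.1 h
        rw [hss] at this
        exact this
      simp [h, this]
    · have : ¬ PySem.List.pyGetD LAB g 0 = s := by
        intro hbad
        apply h
        apply hiff2.2
        rw [hss]
        exact hbad
      simp [h, this]
  rw [List.map_congr_left hcomp2]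
  rw [pvFilter_map_comm]
  have hbody : (fun (tracks : List (List (Int × Int))) (s : Int) =>
      if PySem.List.pyGetD LAB s 0 = s then
        if 2 ≤ (((PySem.List.pyRange 0 ((pvN kps : Nat) : Int) 1).filter
              (fun g => decide (PySem.List.pyGetD LAB g 0 = s))).map
              (fun g => PySem.List.pyGetD (pvNodes kps) g ((0:Int),(0:Int)))).length then
          tracks ++ [((PySem.List.pyRange 0 ((pvN kps : Nat) : Int) 1).filter
              (fun g => decide (PySem.List.pyGetD LAB g 0 = s))).map
              (fun g => PySem.List.pyGetD (pvNodes kps) g ((0:Int),(0:Int)))]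
        else tracks
      else tracks) =
      (fun tracks s =>
        if ((pvLab LAB s == s) && decide (2 ≤ (((PySem.List.pyRange 0 ((pvN kps : Nat) : Int) 1).filter
              (fun g => decide (PySem.List.pyGetD LAB g 0 = s))).map
              (fun g => PySem.List.pyGetD (pvNodes kps) g ((0:Int),(0:Int)))).length)) = true then
          tracks ++ [((PySem.List.pyRange 0 ((pvN kps : Nat) : Int) 1).filter
              (fun g => decide (PySem.List.pyGetD LAB g 0 = s))).map
              (fun g => PySem.List.pyGetD (pvNodes kps) g ((0:Int),(0:Int)))]
        else tracks) := by
    funext tracks s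
    by_cases h1 : PySem.List.pyGetD LAB s 0 = s
    · by_cases h2 : 2 ≤ (((PySem.List.pyRange 0 ((pvN kps : Nat) : Int) 1).filter
          (fun g => decide (PySem.List.pyGetD LAB g 0 = s))).map
          (fun g => PySem.List.pyGetD (pvNodes kps) g ((0:Int),(0:Int)))).length
      · simp [h1, h2, pvLab]
      · simp [h1, h2, pvLab]
    · simp [h1, pvLab]
  rw [hbody, PySem.List.foldl_append_if, List.nil_append]

-- ===== VERDICT (by name: the statement is the Claim_ definition above) =====
theorem build_tracks_spec : Claim_equal_build_tracks := by
  intro keypoints match_dict _ hpre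
  exact pvMain keypoints match_dict hpre
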